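-- pv_equiv track=rewrite | github.com/maxbalk/image_compression | project.py | amplitude
-- ===== SOURCE A (Python) =====
-- amp_table = {
--     1: 1,
--     2: 3,
--     3: 7,
--     4: 15,
--     5: 31,
--     6: 63,
--     7: 127,
--     8: 255,
--     9: 511,
--     10: 1023
-- }
--
-- def amplitude(char):
--     group = 1
--     for key, val in amp_table.items():
--         if abs(char) > val:
--             group += 1
--         else:
--             if char < 0:
--                return (group, val - abs(char))
--             return (group, char)
-- ===== SOURCE B (Python) =====
-- def amplitude(char):
--     a = abs(char)
--     group = a.bit_length() or 1  # bit_length(0)==0 but the smallest band is 1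
--     if group > 10:
--         return None
--     val = (1 << group) - 1
--     return (group, val - a) if char < 0 else (group, char)
-- ===== Notes on version B (the rewrite author's own statement) =====
-- stated objective: idiomatic
-- what changed: Replaces the scan over the fixed ten-entry amp_table with a closed-form band computation via abs(char).bit_length() and reconstructs the band cap arithmetically, so no table is consulted.
import Mathlib
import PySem

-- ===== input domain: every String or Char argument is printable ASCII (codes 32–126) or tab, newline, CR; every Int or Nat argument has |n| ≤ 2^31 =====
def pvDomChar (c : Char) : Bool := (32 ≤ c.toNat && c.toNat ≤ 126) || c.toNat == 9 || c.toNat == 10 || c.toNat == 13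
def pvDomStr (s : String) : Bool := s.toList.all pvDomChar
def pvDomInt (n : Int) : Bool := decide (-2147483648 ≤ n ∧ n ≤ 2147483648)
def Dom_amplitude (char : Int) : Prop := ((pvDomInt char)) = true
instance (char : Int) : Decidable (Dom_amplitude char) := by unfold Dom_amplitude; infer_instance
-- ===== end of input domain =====

-- B replaces A's scan of the 10-entry amp_table by a closed-form bit_length band computation (idiomatic, no table).
-- ===== PORT A =====
def ampTable : List (Int × Int) :=
  [(1, 1), (2, 3), (3, 7), (4, 15), (5, 31), (6, 63), (7, 127), (8, 255), (9, 511), (10, 1023)]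

def ampLoop (char : Int) : List (Int × Int) → Int → Option (Int × Int)
  | [], _ => none
  | (_, val) :: rest, group =>
    if (char.natAbs : Int) > val then ampLoop char rest (group + 1)
    else if char < 0 then some (group, val - (char.natAbs : Int))
    else some (group, char)

def amplitude (char : Int) : Option (Int × Int) := ampLoop char ampTable 1

-- ===== PORT B =====
-- abs(char).bit_length() is Nat.size; `or 1` maps the 0 case to band 1
def amplitude_alt (char : Int) : Option (Int × Int) :=
  let a := char.natAbs
  let group : Nat := if a.size = 0 then 1 else a.size
  if group > 10 then none
  else
    let val : Int := 2 ^ group - 1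
    if char < 0 then some ((group : Int), val - (a : Int)) else some ((group : Int), char)

-- ===== PRECONDITION & SPEC =====
def Spec_amplitude (char : Int) (out : Option (Int × Int)) : Prop := out = amplitude_alt char
instance (char : Int) (out : Option (Int × Int)) : Decidable (Spec_amplitude char out) := by unfold Spec_amplitude; infer_instance

-- ===== CLAIM (what is proved, stated in full; the proofs are below) =====
def Claim_equal_amplitude : Prop := ∀ (char : Int), Dom_amplitude char → Spec_amplitude char (amplitude char)

-- ===== LEMMAS AND PROOFS =====
-- `n.size = k` (Python's bit_length) from the band bounds 2^(k-1) ≤ n < 2^k (given as literals lo, hi)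
theorem size_eq_of_bounds (n k lo hi : ℕ) (hlo : lo = 2 ^ (k - 1)) (hhi : hi = 2 ^ k)
    (h1 : lo ≤ n) (h2 : n < hi) (hk : 1 ≤ k) : n.size = k := by
  have hle : n.size ≤ k := Nat.size_le.mpr (by omega)
  have hlt : k - 1 < n.size := Nat.lt_size.mpr (by omega)
  omega

-- B's result once the band index k is known
theorem alt_band (char : Int) (k : ℕ)
    (hk : (if char.natAbs.size = 0 then 1 else char.natAbs.size) = k) (h10 : k ≤ 10) :
    amplitude_alt char =
      if char < 0 then some ((k : Int), 2 ^ k - 1 - (char.natAbs : Int))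
      else some ((k : Int), char) := by
  simp only [amplitude_alt]
  rw [hk, if_neg (by omega : ¬ k > 10)]

-- ===== VERDICT (by name: the statement is the Claim_ definition above) =====
theorem amplitude_spec : Claim_equal_amplitude := by
  intro char _
  unfold Spec_amplitude
  by_cases c0 : char.natAbs = 0
  · rw [alt_band char 1 (by rw [c0, Nat.size_zero]; norm_num) (by norm_num)]
    unfold amplitude ampTable
    simp only [ampLoop]
    rw [if_neg (show ¬ (char.natAbs : Int) > 1 by omega)]
    norm_num
  by_cases c1 : char.natAbs ≤ 1
  · have hs : char.natAbs.size = 1 :=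
      size_eq_of_bounds char.natAbs 1 1 2 (by norm_num) (by norm_num) (by omega) (by omega) (by norm_num)
    rw [alt_band char 1 (by rw [hs]; norm_num) (by norm_num)]
    unfold amplitude ampTable
    simp only [ampLoop]
    rw [if_neg (show ¬ (char.natAbs : Int) > 1 by omega)]
    norm_num
  by_cases c2 : char.natAbs ≤ 3
  · have hs : char.natAbs.size = 2 :=
      size_eq_of_bounds char.natAbs 2 2 4 (by norm_num) (by norm_num) (by omega) (by omega) (by norm_num)
    rw [alt_band char 2 (by rw [hs]; norm_num) (by norm_num)]
    unfold amplitude ampTable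
    simp only [ampLoop]
    rw [if_pos (show (char.natAbs : Int) > 1 by omega)]
    rw [if_neg (show ¬ (char.natAbs : Int) > 3 by omega)]
    norm_num
  by_cases c3 : char.natAbs ≤ 7
  · have hs : char.natAbs.size = 3 :=
      size_eq_of_bounds char.natAbs 3 4 8 (by norm_num) (by norm_num) (by omega) (by omega) (by norm_num)
    rw [alt_band char 3 (by rw [hs]; norm_num) (by norm_num)]
    unfold amplitude ampTable
    simp only [ampLoop]
    rw [if_pos (show (char.natAbs : Int) > 1 by omega)]
    rw [if_pos (show (char.natAbs : Int) > 3 by omega)]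
    rw [if_neg (show ¬ (char.natAbs : Int) > 7 by omega)]
    norm_num
  by_cases c4 : char.natAbs ≤ 15
  · have hs : char.natAbs.size = 4 :=
      size_eq_of_bounds char.natAbs 4 8 16 (by norm_num) (by norm_num) (by omega) (by omega) (by norm_num)
    rw [alt_band char 4 (by rw [hs]; norm_num) (by norm_num)]
    unfold amplitude ampTable
    simp only [ampLoop]
    rw [if_pos (show (char.natAbs : Int) > 1 by omega)]
    rw [if_pos (show (char.natAbs : Int) > 3 by omega)]
    rw [if_pos (show (char.natAbs : Int) > 7 by omega)]
    rw [if_neg (show ¬ (char.natAbs : Int) > 15 by omega)]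
    norm_num
  by_cases c5 : char.natAbs ≤ 31
  · have hs : char.natAbs.size = 5 :=
      size_eq_of_bounds char.natAbs 5 16 32 (by norm_num) (by norm_num) (by omega) (by omega) (by norm_num)
    rw [alt_band char 5 (by rw [hs]; norm_num) (by norm_num)]
    unfold amplitude ampTable
    simp only [ampLoop]
    rw [if_pos (show (char.natAbs : Int) > 1 by omega)]
    rw [if_pos (show (char.natAbs : Int) > 3 by omega)]
    rw [if_pos (show (char.natAbs : Int) > 7 by omega)]
    rw [if_pos (show (char.natAbs : Int) > 15 by omega)]
    rw [if_neg (show ¬ (char.natAbs : Int) > 31 by omega)]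
    norm_num
  by_cases c6 : char.natAbs ≤ 63
  · have hs : char.natAbs.size = 6 :=
      size_eq_of_bounds char.natAbs 6 32 64 (by norm_num) (by norm_num) (by omega) (by omega) (by norm_num)
    rw [alt_band char 6 (by rw [hs]; norm_num) (by norm_num)]
    unfold amplitude ampTable
    simp only [ampLoop]
    rw [if_pos (show (char.natAbs : Int) > 1 by omega)]
    rw [if_pos (show (char.natAbs : Int) > 3 by omega)]
    rw [if_pos (show (char.natAbs : Int) > 7 by omega)]
    rw [if_pos (show (char.natAbs : Int) > 15 by omega)]
    rw [if_pos (show (char.natAbs : Int) > 31 by omega)]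
    rw [if_neg (show ¬ (char.natAbs : Int) > 63 by omega)]
    norm_num
  by_cases c7 : char.natAbs ≤ 127
  · have hs : char.natAbs.size = 7 :=
      size_eq_of_bounds char.natAbs 7 64 128 (by norm_num) (by norm_num) (by omega) (by omega) (by norm_num)
    rw [alt_band char 7 (by rw [hs]; norm_num) (by norm_num)]
    unfold amplitude ampTable
    simp only [ampLoop]
    rw [if_pos (show (char.natAbs : Int) > 1 by omega)]
    rw [if_pos (show (char.natAbs : Int) > 3 by omega)]
    rw [if_pos (show (char.natAbs : Int) > 7 by omega)]
    rw [if_pos (show (char.natAbs : Int) > 15 by omega)]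
    rw [if_pos (show (char.natAbs : Int) > 31 by omega)]
    rw [if_pos (show (char.natAbs : Int) > 63 by omega)]
    rw [if_neg (show ¬ (char.natAbs : Int) > 127 by omega)]
    norm_num
  by_cases c8 : char.natAbs ≤ 255
  · have hs : char.natAbs.size = 8 :=
      size_eq_of_bounds char.natAbs 8 128 256 (by norm_num) (by norm_num) (by omega) (by omega) (by norm_num)
    rw [alt_band char 8 (by rw [hs]; norm_num) (by norm_num)]
    unfold amplitude ampTable
    simp only [ampLoop]
    rw [if_pos (show (char.natAbs : Int) > 1 by omega)]
    rw [if_pos (show (char.natAbs : Int) > 3 by omega)]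
    rw [if_pos (show (char.natAbs : Int) > 7 by omega)]
    rw [if_pos (show (char.natAbs : Int) > 15 by omega)]
    rw [if_pos (show (char.natAbs : Int) > 31 by omega)]
    rw [if_pos (show (char.natAbs : Int) > 63 by omega)]
    rw [if_pos (show (char.natAbs : Int) > 127 by omega)]
    rw [if_neg (show ¬ (char.natAbs : Int) > 255 by omega)]
    norm_num
  by_cases c9 : char.natAbs ≤ 511
  · have hs : char.natAbs.size = 9 :=
      size_eq_of_bounds char.natAbs 9 256 512 (by norm_num) (by norm_num) (by omega) (by omega) (by norm_num)
    rw [alt_band char 9 (by rw [hs]; norm_num) (by norm_num)]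
    unfold amplitude ampTable
    simp only [ampLoop]
    rw [if_pos (show (char.natAbs : Int) > 1 by omega)]
    rw [if_pos (show (char.natAbs : Int) > 3 by omega)]
    rw [if_pos (show (char.natAbs : Int) > 7 by omega)]
    rw [if_pos (show (char.natAbs : Int) > 15 by omega)]
    rw [if_pos (show (char.natAbs : Int) > 31 by omega)]
    rw [if_pos (show (char.natAbs : Int) > 63 by omega)]
    rw [if_pos (show (char.natAbs : Int) > 127 by omega)]
    rw [if_pos (show (char.natAbs : Int) > 255 by omega)]
    rw [if_neg (show ¬ (char.natAbs : Int) > 511 by omega)]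
    norm_num
  by_cases c10 : char.natAbs ≤ 1023
  · have hs : char.natAbs.size = 10 :=
      size_eq_of_bounds char.natAbs 10 512 1024 (by norm_num) (by norm_num) (by omega) (by omega) (by norm_num)
    rw [alt_band char 10 (by rw [hs]; norm_num) (by norm_num)]
    unfold amplitude ampTable
    simp only [ampLoop]
    rw [if_pos (show (char.natAbs : Int) > 1 by omega)]
    rw [if_pos (show (char.natAbs : Int) > 3 by omega)]
    rw [if_pos (show (char.natAbs : Int) > 7 by omega)]
    rw [if_pos (show (char.natAbs : Int) > 15 by omega)]
    rw [if_pos (show (char.natAbs : Int) > 31 by omega)]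
    rw [if_pos (show (char.natAbs : Int) > 63 by omega)]
    rw [if_pos (show (char.natAbs : Int) > 127 by omega)]
    rw [if_pos (show (char.natAbs : Int) > 255 by omega)]
    rw [if_pos (show (char.natAbs : Int) > 511 by omega)]
    rw [if_neg (show ¬ (char.natAbs : Int) > 1023 by omega)]
    norm_num
  -- remaining: 1024 ≤ |char|, both sides give none
  have hs : 10 < char.natAbs.size := Nat.lt_size.mpr (by norm_num; omega)
  unfold amplitude amplitude_alt ampTable
  simp only [ampLoop]
  rw [if_neg (show ¬ char.natAbs.size = 0 by omega)]
  rw [if_pos (show char.natAbs.size > 10 by omega)]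
  rw [if_pos (show (char.natAbs : Int) > 1 by omega)]
  rw [if_pos (show (char.natAbs : Int) > 3 by omega)]
  rw [if_pos (show (char.natAbs : Int) > 7 by omega)]
  rw [if_pos (show (char.natAbs : Int) > 15 by omega)]
  rw [if_pos (show (char.natAbs : Int) > 31 by omega)]
  rw [if_pos (show (char.natAbs : Int) > 63 by omega)]
  rw [if_pos (show (char.natAbs : Int) > 127 by omega)]
  rw [if_pos (show (char.natAbs : Int) > 255 by omega)]
  rw [if_pos (show (char.natAbs : Int) > 511 by omega)]
  rw [if_pos (show (char.natAbs : Int) > 1023 by omega)]
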